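-- pv_equiv track=rewrite | github.com/SandorPaulUVT/SAT-Solvers-for-MPI | SAT/dpll.py | simplify_clauses
-- ===== SOURCE A (Python) =====
-- def simplify_clauses(clauses, lit):
--     new_clauses = []
--     for clause in clauses:
--         if lit in clause:
--             continue  # Clause is satisfied
--         if -lit in clause:
--             new_clause = [x for x in clause if x != -lit]
--             if not new_clause:
--                 return None  # Conflict (empty clause)
--             new_clauses.append(new_clause)
--         else:
--             new_clauses.append(clause)
--     return new_clauses
-- ===== SOURCE B (Python) =====
-- def simplify_clauses(clauses, lit):
--     # conflict iff some unsatisfied clause reduces to empty: nonempty and all literals == -lit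
--     if any(c and lit not in c and all(x == -lit for x in c) for c in clauses):
--         return None
--     return [[x for x in c if x != -lit] for c in clauses if lit not in c]
-- ===== Notes on version B (the rewrite author's own statement) =====
-- stated objective: alternative
-- what changed: Replaces A's single pass with an accumulator and early return by two declarative staged passes: a whole-formula conflict predicate (any nonempty clause without lit whose literals are all -lit), then a filter+map comprehension building the result.
import Mathlib
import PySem

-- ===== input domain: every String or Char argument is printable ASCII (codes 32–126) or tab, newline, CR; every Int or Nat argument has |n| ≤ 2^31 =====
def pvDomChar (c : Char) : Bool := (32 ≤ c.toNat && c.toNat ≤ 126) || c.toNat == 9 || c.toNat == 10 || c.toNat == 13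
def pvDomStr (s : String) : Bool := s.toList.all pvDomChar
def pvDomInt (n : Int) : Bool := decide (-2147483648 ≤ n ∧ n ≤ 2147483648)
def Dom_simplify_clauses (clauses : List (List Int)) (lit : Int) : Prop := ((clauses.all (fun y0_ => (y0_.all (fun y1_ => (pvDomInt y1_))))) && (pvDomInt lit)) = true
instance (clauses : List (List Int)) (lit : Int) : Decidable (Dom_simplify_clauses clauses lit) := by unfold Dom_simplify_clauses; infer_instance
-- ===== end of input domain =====

-- B recomputes the same simplification as two declarative staged passes (a whole-formula
-- conflict predicate, then a filter+map comprehension) instead of A's single accumulator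
-- loop with an early return; same cost class.


-- ===== PORT A =====
-- loop over clauses with early return None, accumulator new_clauses
def simplifyGoA (lit : Int) (clauses : List (List Int)) (acc : List (List Int)) : Option (List (List Int)) :=
  match clauses with
  | [] => some acc
  | clause :: rest =>
    if clause.contains lit then
      simplifyGoA lit rest acc
    else if clause.contains (-lit) then
      let new_clause := clause.filter (fun x => !(x == -lit))
      if new_clause = [] then none
      else simplifyGoA lit rest (acc ++ [new_clause])
    else
      simplifyGoA lit rest (acc ++ [clause])

def simplify_clauses (clauses : List (List Int)) (lit : Int) : Option (List (List Int)) :=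
  simplifyGoA lit clauses []

-- ===== PORT B =====
-- stage 1: conflict predicate — some nonempty clause without lit whose literals are all -lit
def hasConflict (clauses : List (List Int)) (lit : Int) : Bool :=
  clauses.any (fun c => !c.isEmpty && !c.contains lit && c.all (fun x => x == -lit))

-- stage 2: comprehension — drop satisfied clauses, strip -lit from the rest
def simplify_clauses_alt (clauses : List (List Int)) (lit : Int) : Option (List (List Int)) :=
  if hasConflict clauses lit then none
  else some ((clauses.filter (fun c => !c.contains lit)).map
               (fun c => c.filter (fun x => !(x == -lit))))

-- ===== PRECONDITION & SPEC =====
def Spec_simplify_clauses (clauses : List (List Int)) (lit : Int) (out : Option (List (List Int))) : Prop := out = simplify_clauses_alt clauses lit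
instance (clauses : List (List Int)) (lit : Int) (out : Option (List (List Int))) : Decidable (Spec_simplify_clauses clauses lit out) := by unfold Spec_simplify_clauses; infer_instance

-- ===== CLAIM (what is proved, stated in full; the proofs are below) =====
def Claim_equal_simplify_clauses : Prop := ∀ (clauses : List (List Int)) (lit : Int), Dom_simplify_clauses clauses lit → Spec_simplify_clauses clauses lit (simplify_clauses clauses lit)

-- ===== LEMMAS AND PROOFS =====

-- a clause is a conflict clause iff A's branch conditions lead to the empty filter
theorem conflict_clause_iff (lit : Int) (c : List Int) :
    (!c.isEmpty && !c.contains lit && c.all (fun x => x == -lit)) = true ↔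
      (¬ lit ∈ c ∧ (-lit) ∈ c ∧ c.filter (fun x => !(x == -lit)) = []) := by
  constructor
  · rintro h
    simp only [Bool.and_eq_true, Bool.not_eq_true', List.contains_eq_mem,
      List.isEmpty_eq_false_iff, List.all_eq_true, beq_iff_eq, decide_eq_false_iff_not] at h
    obtain ⟨⟨hne, hnl⟩, hall⟩ := h
    refine ⟨hnl, ?_, ?_⟩
    · obtain ⟨x, hx⟩ := List.exists_mem_of_ne_nil c hne
      exact (hall x hx) ▸ hx
    · apply List.filter_eq_nil_iff.mpr
      intro x hx; simp [hall x hx]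
  · rintro ⟨hnl, hm, hf⟩
    have hall : ∀ x ∈ c, x = -lit := by
      intro x hx
      by_contra hne
      have := List.filter_eq_nil_iff.mp hf x hx
      simp [hne] at this
    have hne : c ≠ [] := by rintro rfl; simp at hm
    simp only [Bool.and_eq_true, Bool.not_eq_true', List.contains_eq_mem,
      List.isEmpty_eq_false_iff, List.all_eq_true, beq_iff_eq, decide_eq_false_iff_not]
    exact ⟨⟨hne, hnl⟩, hall⟩

-- A's accumulator loop equals B's staged computation
theorem simplifyGoA_eq (lit : Int) (clauses : List (List Int)) (acc : List (List Int)) :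
    simplifyGoA lit clauses acc =
      if hasConflict clauses lit then none
      else some (acc ++ (clauses.filter (fun c => !c.contains lit)).map
                          (fun c => c.filter (fun x => !(x == -lit)))) := by
  induction clauses generalizing acc with
  | nil => simp [simplifyGoA, hasConflict]
  | cons c rest ih =>
    have hconf : hasConflict (c :: rest) lit =
        ((!c.isEmpty && !c.contains lit && c.all (fun x => x == -lit)) || hasConflict rest lit) := by
      simp [hasConflict]
    by_cases hl : lit ∈ c
    · have hfc : (c :: rest).filter (fun c => !c.contains lit) =
          rest.filter (fun c => !c.contains lit) := by simp [hl]
      have hc : (!c.isEmpty && !c.contains lit && c.all (fun x => x == -lit)) = false := by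
        simp only [Bool.and_eq_false_iff, List.contains_eq_mem]
        left; right; simp [hl]
      have hL : simplifyGoA lit (c :: rest) acc = simplifyGoA lit rest acc := by
        simp [simplifyGoA, hl]
      rw [hL, ih, hconf, hc, Bool.false_or, hfc]
    · by_cases hn : (-lit) ∈ c
      · by_cases he : c.filter (fun x => !(x == -lit)) = []
        · have hc : (!c.isEmpty && !c.contains lit && c.all (fun x => x == -lit)) = true :=
            (conflict_clause_iff lit c).mpr ⟨hl, hn, he⟩
          have hL : simplifyGoA lit (c :: rest) acc = none := by
            simp [simplifyGoA, hl, hn, he]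
          rw [hL, hconf, hc, Bool.true_or]
          simp
        · have hc : (!c.isEmpty && !c.contains lit && c.all (fun x => x == -lit)) = false := by
            by_contra h
            rw [Bool.not_eq_false] at h
            exact he ((conflict_clause_iff lit c).mp h).2.2
          have hfc : (c :: rest).filter (fun c => !c.contains lit) =
              c :: rest.filter (fun c => !c.contains lit) := by simp [hl]
          have hL : simplifyGoA lit (c :: rest) acc =
              simplifyGoA lit rest (acc ++ [c.filter (fun x => !(x == -lit))]) := by
            simp [simplifyGoA, hl, hn, he]
          rw [hL, ih, hconf, hc, Bool.false_or, hfc]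
          simp
      · have hrefl : c.filter (fun x => !(x == -lit)) = c := by
          apply List.filter_eq_self.mpr
          intro x hx
          simp only [Bool.not_eq_eq_eq_not, Bool.not_true, beq_eq_false_iff_ne, ne_eq]
          rintro rfl; exact hn hx
        have hc : (!c.isEmpty && !c.contains lit && c.all (fun x => x == -lit)) = false := by
          by_contra h
          rw [Bool.not_eq_false] at h
          exact hn ((conflict_clause_iff lit c).mp h).2.1
        have hfc : (c :: rest).filter (fun c => !c.contains lit) =
            c :: rest.filter (fun c => !c.contains lit) := by simp [hl]
        have hL : simplifyGoA lit (c :: rest) acc = simplifyGoA lit rest (acc ++ [c]) := by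
          simp [simplifyGoA, hl, hn]
        rw [hL, ih, hconf, hc, Bool.false_or, hfc]
        simp [hrefl]

-- ===== VERDICT (by name: the statement is the Claim_ definition above) =====
theorem simplify_clauses_spec : Claim_equal_simplify_clauses := by
  intro clauses lit _
  unfold Spec_simplify_clauses simplify_clauses simplify_clauses_alt
  simpa using simplifyGoA_eq lit clauses []
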